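-- pv_equiv track=rewrite | github.com/MohamedHamed12/problem_solving | codefoeces/1738/A.py | get
-- ===== SOURCE A (Python) =====
-- def get(l1,l2):
--             tot=0
--             if l1[-1]<l2[-1]:
--                 tot+= l1.pop()
--                 while l2 :
--                     tot += l2.pop(0)*2
--                     if l1:   tot += l1.pop(0)*2
--             else:
--                 tot+= l2.pop()
--                 while l1 :
--                     tot += l1.pop(0)*2
--                     if l2:   tot += l2.pop(0)*2
--
--             return tot
-- ===== SOURCE B (Python) =====
-- def get(l1, l2):
--     if l1[-1] < l2[-1]:
--         k = min(len(l1) - 1, len(l2))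
--         return l1[-1] + 2 * (sum(l2) + sum(l1[:k]))
--     else:
--         k = min(len(l2) - 1, len(l1))
--         return l2[-1] + 2 * (sum(l1) + sum(l2[:k]))
-- ===== Notes on version B (the rewrite author's own statement) =====
-- stated objective: faster
-- what changed: Replaces the destructive while-loop of repeated pop(0) (each O(n)) with a closed form: last element plus twice the sums of the other list and a prefix of the chosen list, computed with sum/len arithmetic; B also does not mutate its arguments.
import Mathlib
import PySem

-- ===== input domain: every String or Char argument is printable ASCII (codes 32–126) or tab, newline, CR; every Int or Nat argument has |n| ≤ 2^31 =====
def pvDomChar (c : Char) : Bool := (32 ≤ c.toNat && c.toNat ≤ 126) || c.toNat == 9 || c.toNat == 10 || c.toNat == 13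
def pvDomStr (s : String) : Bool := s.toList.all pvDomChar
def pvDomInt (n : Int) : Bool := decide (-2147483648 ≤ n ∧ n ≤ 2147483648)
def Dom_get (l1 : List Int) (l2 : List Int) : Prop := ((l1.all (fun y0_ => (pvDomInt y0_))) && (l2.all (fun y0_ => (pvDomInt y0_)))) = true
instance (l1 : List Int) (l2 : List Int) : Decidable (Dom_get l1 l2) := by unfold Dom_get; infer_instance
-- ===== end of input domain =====

-- B replaces A's destructive pop(0) loop by a closed form over sums and lengths (O(n) vs O(n^2)).
-- A mutates l1 and l2 in place; B does not. The equivalence proved here is about the return value only.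

-- ===== PORT A =====
-- the 'while l2:' loop of A's first branch: pop front of l2 (×2), then pop front of l1 (×2) if nonempty
def getLoop (l1 : List Int) (l2 : List Int) (tot : Int) : Int :=
  match l2 with
  | [] => tot
  | y :: l2' =>
    match l1 with
    | [] => getLoop [] l2' (tot + y * 2)
    | x :: l1' => getLoop l1' l2' (tot + y * 2 + x * 2)

def get (l1 : List Int) (l2 : List Int) : Int :=
  match l1.getLast?, l2.getLast? with
  | some a, some b =>
    if a < b then
      -- tot += l1.pop(); then the while-l2 loop over the remaining lists
      getLoop l1.dropLast l2 a
    else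
      getLoop l2.dropLast l1 b
  | _, _ => 0   -- l1[-1]/l2[-1] raises IndexError in Python; excluded by Pre_get

-- ===== PORT B =====
def get_alt (l1 : List Int) (l2 : List Int) : Int :=
  -- l1[-1] / l2[-1]; the default 0 is never used: empty inputs raise in Python and are outside Pre_get
  let a := l1.getLast?.getD 0
  let b := l2.getLast?.getD 0
  if a < b then
    a + 2 * (l2.sum + (l1.take (min (l1.length - 1) l2.length)).sum)
  else
    b + 2 * (l1.sum + (l2.take (min (l2.length - 1) l1.length)).sum)

-- ===== PRECONDITION & SPEC =====
-- A (and B) raise IndexError on an empty l1 or l2 (l1[-1] / l2[-1]); exactly those inputs are excluded.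
def Pre_get (l1 : List Int) (l2 : List Int) : Prop := l1 ≠ [] ∧ l2 ≠ []
instance (l1 : List Int) (l2 : List Int) : Decidable (Pre_get l1 l2) := by unfold Pre_get; infer_instance
def pvWitness_get : List Int × List Int := ([1, 2], [3])

def Spec_get (l1 : List Int) (l2 : List Int) (out : Int) : Prop := out = get_alt l1 l2
instance (l1 : List Int) (l2 : List Int) (out : Int) : Decidable (Spec_get l1 l2 out) := by unfold Spec_get; infer_instance

-- ===== CLAIM (what is proved, stated in full; the proofs are below) =====
def Claim_equal_get : Prop := ∀ (l1 : List Int) (l2 : List Int), Dom_get l1 l2 → Pre_get l1 l2 → Spec_get l1 l2 (get l1 l2)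

-- ===== LEMMAS AND PROOFS =====

theorem getLoop_eq (l2 l1 : List Int) (tot : Int) :
    getLoop l1 l2 tot = tot + 2 * (l2.sum + (l1.take l2.length).sum) := by
  induction l2 generalizing l1 tot with
  | nil => simp [getLoop]
  | cons y l2' ih =>
    cases l1 with
    | nil => simp [getLoop, ih]; ring
    | cons x l1' => simp [getLoop, ih]; ring

theorem take_dropLast_sum (l : List Int) (n : ℕ) :
    ((l.dropLast.take n).sum) = ((l.take (min (l.length - 1) n)).sum) := by
  rw [List.dropLast_eq_take, List.take_take, Nat.min_comm]

-- ===== VERDICT (by name: the statement is the Claim_ definition above) =====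
theorem get_spec : Claim_equal_get := by
  intro l1 l2 _ hpre
  obtain ⟨h1, h2⟩ := hpre
  unfold Spec_get _root_.get get_alt
  obtain ⟨a, ha⟩ : ∃ a, l1.getLast? = some a := Option.isSome_iff_exists.mp (List.getLast?_isSome.mpr h1)
  obtain ⟨b, hb⟩ : ∃ b, l2.getLast? = some b := Option.isSome_iff_exists.mp (List.getLast?_isSome.mpr h2)
  simp only [ha, hb, Option.getD_some]
  by_cases hab : a < b <;> simp [hab, getLoop_eq, take_dropLast_sum]
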